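-- pv_equiv track=rewrite | github.com/ferhatelmas/algo | topCoder/srms/500s/srm502/div2/the_programming_contest_div_2.py | find
-- ===== SOURCE A (Python) =====
-- def find(T, requiredTime):
--     s, t, p = 0, 0, 0
--     for i in sorted(requiredTime):
--         if T >= p + i:
--             s += 1
--             p += i
--             t += p
--         else:
--             break
--     return s, t
-- ===== SOURCE B (Python) =====
-- def find(T, requiredTime):
--     ys = sorted(requiredTime)
--     # prefix sums of the sorted times
--     ps = []
--     c = 0
--     for x in ys:
--         c += x
--         ps.append(c)
--     # s = number of leading tasks, stopping at the first prefix sum exceeding T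
--     s = 0
--     while s < len(ps) and ps[s] <= T:
--         s += 1
--     # penalty as a position-weighted sum over the chosen prefix
--     return s, sum(ys[k] * (s - k) for k in range(s))
-- ===== Notes on version B (the rewrite author's own statement) =====
-- stated objective: alternative
-- what changed: Replaces the single interleaved greedy accumulator loop by three decoupled passes: build prefix sums of the sorted times, count leading prefix sums within T (stopping at the first overflow), then compute the penalty as a closed-form position-weighted sum over the chosen prefix.
import Mathlib
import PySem

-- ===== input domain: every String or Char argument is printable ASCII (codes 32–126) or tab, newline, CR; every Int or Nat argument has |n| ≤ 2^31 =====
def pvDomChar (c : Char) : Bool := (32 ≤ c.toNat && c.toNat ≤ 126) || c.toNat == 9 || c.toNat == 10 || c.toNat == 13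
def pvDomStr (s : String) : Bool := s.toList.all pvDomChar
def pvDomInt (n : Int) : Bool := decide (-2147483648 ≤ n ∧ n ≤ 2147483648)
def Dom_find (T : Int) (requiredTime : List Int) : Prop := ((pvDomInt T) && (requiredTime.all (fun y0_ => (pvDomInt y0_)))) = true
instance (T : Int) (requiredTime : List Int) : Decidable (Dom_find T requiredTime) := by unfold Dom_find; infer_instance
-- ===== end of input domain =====

-- B rewrites A's interleaved greedy accumulator as three decoupled passes
-- (prefix sums, count within budget, position-weighted penalty); alternative
-- decomposition, same cost.

-- ===== PORT A =====
-- the for-loop with break: state (s, t, p), stops at the first i with T < p + i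
def findGo (T s t p : Int) : List Int → Int × Int
  | [] => (s, t)
  | i :: rest => if T ≥ p + i then findGo T (s + 1) (t + (p + i)) (p + i) rest else (s, t)

def find (T : Int) (requiredTime : List Int) : Int × Int :=
  findGo T 0 0 0 (PySem.List.sorted requiredTime (fun x => x) false)

-- ===== PORT B =====
-- the first for-loop of Source B: prefix sums of ys with running total c
def pvPrefixSums (c : Int) : List Int → List Int
  | [] => []
  | x :: r => (c + x) :: pvPrefixSums (c + x) r

-- the while-loop of Source B: count leading prefix sums ≤ T, stop at the first > T
def pvCountWithin (T : Int) : List Int → Nat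
  | [] => 0
  | p :: r => if p ≤ T then 1 + pvCountWithin T r else 0

def find_alt (T : Int) (requiredTime : List Int) : Int × Int :=
  let ys := PySem.List.sorted requiredTime (fun x => x) false
  let ps := pvPrefixSums 0 ys
  let s := pvCountWithin T ps
  ((s : Int), ((List.range s).map (fun (k : Nat) => PySem.List.pyGetD ys (k : Int) 0 * ((s : Int) - (k : Int)))).sum)

-- ===== PRECONDITION & SPEC =====
def Spec_find (T : Int) (requiredTime : List Int) (out : Int × Int) : Prop := out = find_alt T requiredTime
instance (T : Int) (requiredTime : List Int) (out : Int × Int) : Decidable (Spec_find T requiredTime out) := by unfold Spec_find; infer_instance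

-- ===== CLAIM (what is proved, stated in full; the proofs are below) =====
def Claim_equal_find : Prop := ∀ (T : Int) (requiredTime : List Int), Dom_find T requiredTime → Spec_find T requiredTime (find T requiredTime)

-- ===== LEMMAS AND PROOFS =====

theorem pvCountWithin_le_length (T : Int) (l : List Int) : pvCountWithin T l ≤ l.length := by
  induction l with
  | nil => simp [pvCountWithin]
  | cons p r ih =>
    simp only [pvCountWithin, List.length_cons]
    split <;> omega

theorem pvPrefixSums_length (c : Int) (l : List Int) : (pvPrefixSums c l).length = l.length := by
  induction l generalizing c with
  | nil => rfl
  | cons x r ih => simp [pvPrefixSums, ih]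

theorem pvPrefixSums_add (c : Int) (l : List Int) : ∀ d, pvPrefixSums (c + d) l = (pvPrefixSums d l).map (c + ·) := by
  induction l with
  | nil => intro d; rfl
  | cons x r ih =>
    intro d
    simp only [pvPrefixSums, List.map_cons]
    rw [show c + d + x = c + (d + x) by ring, ih (d + x)]

-- A's loop computes the count and the sum of the included prefix sums
theorem findGo_eq (T : Int) (l : List Int) : ∀ s t p,
    findGo T s t p l =
      (s + (pvCountWithin T (pvPrefixSums p l) : Int),
       t + ((pvPrefixSums p l).take (pvCountWithin T (pvPrefixSums p l))).sum) := by
  induction l with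
  | nil => intro s t p; simp [findGo, pvPrefixSums, pvCountWithin]
  | cons i rest ih =>
    intro s t p
    simp only [findGo, pvPrefixSums, pvCountWithin]
    by_cases h : p + i ≤ T
    · rw [if_pos (by omega : T ≥ p + i), if_pos h, ih]
      simp only [Nat.one_add, List.take_succ_cons, List.sum_cons, Prod.mk.injEq]
      constructor
      · push_cast; ring
      · ring
    · rw [if_neg (by omega : ¬ T ≥ p + i), if_neg h]
      simp

theorem sum_map_add_const (c : Int) (l : List Int) : (l.map (c + ·)).sum = l.sum + l.length * c := by
  induction l with
  | nil => simp
  | cons x r ih => simp [ih]; ring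

-- the position-weighted sum equals the sum of the included prefix sums
theorem weighted_eq_take_sum (l : List Int) : ∀ s : Nat, s ≤ l.length →
    ((List.range s).map (fun (k : Nat) => l.getD k 0 * ((s : Int) - (k : Int)))).sum
      = ((pvPrefixSums 0 l).take s).sum := by
  induction l with
  | nil =>
    intro s hs
    have h0 : s = 0 := by simpa using hs
    subst h0; simp
  | cons x r ih =>
    intro s hs
    cases s with
    | zero => simp
    | succ m =>
      have hm : m ≤ r.length := by simpa using hs
      have hx : pvPrefixSums x r = (pvPrefixSums 0 r).map (x + ·) := by
        have := pvPrefixSums_add x r 0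
        rw [add_zero] at this
        exact this
      have hlen : (List.take m (pvPrefixSums 0 r)).length = m := by
        rw [List.length_take, pvPrefixSums_length]; omega
      have htake : ((pvPrefixSums x r).take m).sum = ((pvPrefixSums 0 r).take m).sum + m * x := by
        rw [hx, ← List.map_take, sum_map_add_const, hlen]
      rw [List.range_succ_eq_map]
      simp only [List.map_cons, List.map_map, List.sum_cons, Function.comp_def,
        List.getD_cons_succ, List.getD_cons_zero, pvPrefixSums, List.take_succ_cons,
        Nat.cast_zero, Nat.cast_succ, zero_add]
      have hfun : ((List.range m).map (fun (k : Nat) => r.getD k 0 * (((m : Int) + 1) - ((k : Int) + 1)))).sum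
          = ((List.range m).map (fun (k : Nat) => r.getD k 0 * ((m : Int) - (k : Int)))).sum := by
        congr 1
        apply List.map_congr_left
        intro k _
        ring_nf
      rw [hfun, ih m hm, htake]
      ring

-- ===== VERDICT (by name: the statement is the Claim_ definition above) =====
theorem find_spec : Claim_equal_find := by
  intro T requiredTime _
  unfold Spec_find find find_alt
  set ys := PySem.List.sorted requiredTime (fun x => x) false with hys
  rw [findGo_eq]
  have hle : pvCountWithin T (pvPrefixSums 0 ys) ≤ ys.length := by
    have := pvCountWithin_le_length T (pvPrefixSums 0 ys)
    rwa [pvPrefixSums_length] at this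
  simp only [zero_add, PySem.List.pyGetD_natCast]
  exact Prod.ext rfl (weighted_eq_take_sum ys _ hle).symm
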